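-- pv_equiv track=rewrite | github.com/JBELE4/algorimos-codigos | juez/juez5/sandia.py | sandia
-- ===== SOURCE A (Python) =====
-- def sandia(w, c, xs, xe, ys, ye):
--     if c == 0:
--         #Iterate over the watermelon and return total
--         total = 0
--         for i in range(xs, xe):
--             for j in range(ys, ye):
--                 total += w[i][j]
--         return total
--
--     # Get mid points
--     xm = (xs + xe) // 2
--     ym = (ys + ye) // 2
--
--     # Recursive calling. Return the minimum of the totals
--     total1 = sandia(w, c-1, xs, xm, ys, ym)
--     total2 = sandia(w, c-1, xm, xe, ys, ym)
--     total3 = sandia(w, c-1, xs, xm, ym, ye)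
--     total4 = sandia(w, c-1, xm, xe, ym, ye)
--     return min(total1, total2, total3, total4)
-- ===== SOURCE B (Python) =====
-- def sandia(w, c, xs, xe, ys, ye):
--     # Per-row prefix sums, then iterate the same quadrant leaves with an
--     # explicit worklist; each leaf sum is a prefix-sum difference per row.
--     R = []
--     for row in w:
--         acc = 0
--         pre = [0]
--         for x in row:
--             acc += x
--             pre.append(acc)
--         R.append(pre)
--     best = None
--     stack = [(c, xs, xe, ys, ye)]
--     while stack:
--         k, a, b, u, v = stack.pop()
--         if k == 0:
--             s = 0
--             if u < v:
--                 for i in range(a, b):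
--                     s += R[i][v] - R[i][u]
--             if best is None or s < best:
--                 best = s
--         else:
--             xm = (a + b) // 2
--             ym = (u + v) // 2
--             stack.append((k - 1, a, xm, u, ym))
--             stack.append((k - 1, xm, b, u, ym))
--             stack.append((k - 1, a, xm, ym, v))
--             stack.append((k - 1, xm, b, ym, v))
--     return best
-- ===== Notes on version B (the rewrite author's own statement) =====
-- stated objective: alternative
-- what changed: B replaces A's recursion by an explicit worklist of rectangles and replaces each leaf's nested double summation by per-row prefix sums built once, so every leaf costs one prefix-difference per row instead of a scan per cell.
-- outside the precondition, e.g. on sandia([[-4, -1, 2], [6, -7, -4], [3, -5]], 0, -3, 1, -2, 1): A returns -10, B returns 9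
import Mathlib
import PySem

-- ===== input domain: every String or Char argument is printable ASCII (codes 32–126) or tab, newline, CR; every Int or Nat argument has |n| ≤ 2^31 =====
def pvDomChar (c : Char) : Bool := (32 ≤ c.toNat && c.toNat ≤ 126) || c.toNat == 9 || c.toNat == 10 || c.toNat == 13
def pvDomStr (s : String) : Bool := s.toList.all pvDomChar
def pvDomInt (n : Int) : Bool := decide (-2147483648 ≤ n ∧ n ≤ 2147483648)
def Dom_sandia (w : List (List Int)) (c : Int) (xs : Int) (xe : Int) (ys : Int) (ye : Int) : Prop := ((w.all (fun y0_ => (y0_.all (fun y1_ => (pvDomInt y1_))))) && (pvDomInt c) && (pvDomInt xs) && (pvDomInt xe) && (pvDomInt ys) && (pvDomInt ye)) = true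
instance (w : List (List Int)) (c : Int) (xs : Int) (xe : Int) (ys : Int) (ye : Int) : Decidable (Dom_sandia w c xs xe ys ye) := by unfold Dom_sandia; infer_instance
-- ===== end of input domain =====

-- B (alternative): per-row prefix sums plus an explicit worklist over the same quadrant leaves,
-- replacing A's per-leaf nested summation and its recursion; same minimum, proved equal on Pre_.

-- ===== PORT A =====
-- the c == 0 base case: nested summation over the half-open rectangle
def sandiaBase (w : List (List Int)) (xs xe ys ye : Int) : Int :=
  (PySem.List.pyRange xs xe 1).foldl (fun total i =>
    (PySem.List.pyRange ys ye 1).foldl (fun t j =>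
      t + PySem.List.pyGetD (PySem.List.pyGetD w i []) j 0) total) 0

-- Python recurses on c and returns only for 0 ≤ c (in Pre_): the port recurses on the fuel c.toNat
def sandiaGo (w : List (List Int)) : Nat → Int → Int → Int → Int → Int
  | 0, xs, xe, ys, ye => sandiaBase w xs xe ys ye
  | c + 1, xs, xe, ys, ye =>
    let xm := PySem.Int.floordiv (xs + xe) 2
    let ym := PySem.Int.floordiv (ys + ye) 2
    min (min (min (sandiaGo w c xs xm ys ym) (sandiaGo w c xm xe ys ym))
          (sandiaGo w c xs xm ym ye)) (sandiaGo w c xm xe ym ye)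

def sandia (w : List (List Int)) (c : Int) (xs : Int) (xe : Int) (ys : Int) (ye : Int) : Int :=
  sandiaGo w c.toNat xs xe ys ye

-- ===== PORT B =====
-- pre = [0]; for x in row: acc += x; pre.append(acc)   (state = (acc, pre))
def prefRow (row : List Int) : List Int :=
  (row.foldl (fun (st : Int × List Int) x => (st.1 + x, st.2 ++ [st.1 + x])) (0, [0])).2

-- R = []; for row in w: R.append(prefRow-loop)
def buildR (w : List (List Int)) : List (List Int) :=
  w.foldl (fun R row => R ++ [prefRow row]) []

-- the leaf body: s = 0; if u < v: for i in range(a,b): s += R[i][v] - R[i][u]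
def leafSum (R : List (List Int)) (a b u v : Int) : Int :=
  if u < v then
    (PySem.List.pyRange a b 1).foldl (fun s i =>
      s + (PySem.List.pyGetD (PySem.List.pyGetD R i []) v 0
           - PySem.List.pyGetD (PySem.List.pyGetD R i []) u 0)) 0
  else 0

-- if best is None or s < best: best = s
def pushMin (best : Option Int) (s : Int) : Option Int :=
  match best with
  | none => some s
  | some b0 => if s < b0 then some s else some b0

-- the while-stack loop; top of stack = head of list (Python pops the last-appended entry first,
-- so the four children are consed in reverse append order); the depth field is the Nat fuel k.toNat
def altLoop (R : List (List Int)) : List (Nat × Int × Int × Int × Int) → Option Int → Option Int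
  | [], best => best
  | (0, a, b, u, v) :: rest, best => altLoop R rest (pushMin best (leafSum R a b u v))
  | (Nat.succ k, a, b, u, v) :: rest, best =>
    let xm := PySem.Int.floordiv (a + b) 2
    let ym := PySem.Int.floordiv (u + v) 2
    altLoop R ((k, xm, b, ym, v) :: (k, a, xm, ym, v) :: (k, xm, b, u, ym) :: (k, a, xm, u, ym) :: rest) best
  termination_by st _ => (st.map (fun e => 5 ^ e.1)).sum
  decreasing_by
  · simp only [List.map_cons, List.sum_cons, pow_zero]; omega
  · simp only [List.map_cons, List.sum_cons, pow_succ]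
    have h5 : 0 < 5 ^ k := Nat.pow_pos (show 0 < 5 by norm_num) (n := k)
    omega

-- best starts as None and the stack starts nonempty, so the loop always returns an int (.getD 0 is unreachable)
def sandia_alt (w : List (List Int)) (c : Int) (xs : Int) (xe : Int) (ys : Int) (ye : Int) : Int :=
  (altLoop (buildR w) [(c.toNat, xs, xe, ys, ye)] none).getD 0

-- ===== PRECONDITION & SPEC =====
-- the rectangle (and every sub-rectangle the midpoint splits generate) stays inside the grid:
-- either the coordinates are in bounds, or the x-range (or y-range) is empty so nothing is read
def GoodBox (w : List (List Int)) (a b u v : Int) : Prop :=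
  (0 ≤ a ∧ a ≤ (w.length : Int) ∧ 0 ≤ b ∧ b ≤ (w.length : Int) ∧ 0 ≤ u ∧ 0 ≤ v ∧
     ∀ row ∈ w, u ≤ (row.length : Int) ∧ v ≤ (row.length : Int)) ∨ b ≤ a ∨ v ≤ u

-- Pre_ excludes only inputs on which A does not return an ordinary specified value: negative c
-- (A recurses forever) and coordinates outside the grid from which A actually reads — there A
-- raises IndexError or reads rows/cells through Python's negative-index wraparound, an accident
-- of representation neither implementation specifies. Empty x- or y-ranges (xe ≤ xs or ye ≤ ys),
-- where A returns 0 without reading w, stay inside Pre_.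
def Pre_sandia (w : List (List Int)) (c : Int) (xs : Int) (xe : Int) (ys : Int) (ye : Int) : Prop :=
  0 ≤ c ∧ GoodBox w xs xe ys ye

instance (w : List (List Int)) (c : Int) (xs : Int) (xe : Int) (ys : Int) (ye : Int) : Decidable (Pre_sandia w c xs xe ys ye) := by
  unfold Pre_sandia GoodBox; infer_instance

def pvWitness_sandia : List (List Int) × Int × Int × Int × Int × Int :=
  ([[1, 2], [3, 4]], 1, 0, 2, 0, 2)

def Spec_sandia (w : List (List Int)) (c : Int) (xs : Int) (xe : Int) (ys : Int) (ye : Int) (out : Int) : Prop := out = sandia_alt w c xs xe ys ye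
instance (w : List (List Int)) (c : Int) (xs : Int) (xe : Int) (ys : Int) (ye : Int) (out : Int) : Decidable (Spec_sandia w c xs xe ys ye out) := by unfold Spec_sandia; infer_instance

-- ===== CLAIM (what is proved, stated in full; the proofs are below) =====
def Claim_equal_sandia : Prop := ∀ (w : List (List Int)) (c : Int) (xs : Int) (xe : Int) (ys : Int) (ye : Int), Dom_sandia w c xs xe ys ye → Pre_sandia w c xs xe ys ye → Spec_sandia w c xs xe ys ye (sandia w c xs xe ys ye)

-- ===== LEMMAS AND PROOFS =====

-- A's recursion replayed over B's prefix-sum leaves: the reference both ports are reduced to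
def goB (R : List (List Int)) : Nat → Int → Int → Int → Int → Int
  | 0, a, b, u, v => leafSum R a b u v
  | k + 1, a, b, u, v =>
    let xm := PySem.Int.floordiv (a + b) 2
    let ym := PySem.Int.floordiv (u + v) 2
    min (min (min (goB R k a xm u ym) (goB R k xm b u ym)) (goB R k a xm ym v)) (goB R k xm b ym v)

theorem pushMin_pushMin (best : Option Int) (s t : Int) :
    pushMin (pushMin best s) t = pushMin best (min t s) := by
  cases best <;> simp only [pushMin, min_def] <;> split_ifs <;> simp_all <;> omega

theorem altLoop_spec (R : List (List Int)) (st : List (Nat × Int × Int × Int × Int)) (best : Option Int) :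
    altLoop R st best
      = st.foldl (fun acc e => pushMin acc (goB R e.1 e.2.1 e.2.2.1 e.2.2.2.1 e.2.2.2.2)) best := by
  fun_induction altLoop R st best with
  | case1 => rfl
  | case2 a b u v rest best ih => simpa [goB] using ih
  | case3 k a b u v rest best xm ym ih =>
      simp only [List.foldl_cons] at ih ⊢
      rw [ih, pushMin_pushMin, pushMin_pushMin, pushMin_pushMin]
      show _ = List.foldl _ (pushMin best (goB R (k+1) a b u v)) rest
      simp only [goB]
      rfl

theorem buildR_eq (w : List (List Int)) : buildR w = w.map prefRow := by
  unfold buildR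
  rw [PySem.List.foldl_append_singleton_eq_map, List.nil_append]

theorem pref_fold (l : List Int) : ∀ (s : Int) (p : List Int),
    l.foldl (fun (st : Int × List Int) x => (st.1 + x, st.2 ++ [st.1 + x])) (s, p)
      = (s + l.sum, p ++ (List.range l.length).map (fun t => s + (l.take (t+1)).sum)) := by
  induction l with
  | nil => intro s p; simp
  | cons x xs ih =>
      intro s p
      rw [List.foldl_cons, ih (s + x) (p ++ [s + x])]
      simp [List.range_succ_eq_map, List.map_map, Function.comp, add_assoc]

theorem prefRow_eq (row : List Int) :
    prefRow row = (List.range (row.length + 1)).map (fun t => (row.take t).sum) := by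
  unfold prefRow
  rw [pref_fold row 0 [0]]
  simp [List.range_succ_eq_map, List.map_map, Function.comp]

theorem prefRow_get (row : List Int) (t : Int) (h0 : 0 ≤ t) (hle : t ≤ (row.length : Int)) :
    PySem.List.pyGetD (prefRow row) t 0 = (row.take t.toNat).sum := by
  rw [prefRow_eq, PySem.List.pyGetD_eq_getElem _ 0 h0 (by simp; omega)]
  simp

theorem sum_range_getD (row : List Int) : ∀ (m u' : Nat), u' + m ≤ row.length →
    ((List.range m).map (fun k => row.getD (u' + k) 0)).sum
      = (row.take (u' + m)).sum - (row.take u').sum := by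
  intro m
  induction m with
  | zero => intro u' _; simp
  | succ m ih =>
      intro u' hlt
      rw [List.range_succ, List.map_append, List.sum_append, ih u' (by omega)]
      have hm : u' + m < row.length := by omega
      rw [show u' + (m+1) = (u' + m) + 1 by omega, List.take_add_one]
      simp [List.getD_eq_getElem?_getD, hm]
      omega

theorem rowSeg_sum (row : List Int) (u v : Int) (h0 : 0 ≤ u) (huv : u ≤ v) (hv : v ≤ (row.length : Int)) :
    ((PySem.List.pyRange u v 1).map (fun j => PySem.List.pyGetD row j 0)).sum
      = (row.take v.toNat).sum - (row.take u.toNat).sum := by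
  rw [PySem.List.pyRange_one, List.map_map]
  have hc : ∀ k ∈ List.range (v - u).toNat,
      ((fun j => PySem.List.pyGetD row j 0) ∘ fun k : Nat => u + (k : Int)) k = row.getD (u.toNat + k) 0 := by
    intro k _
    show PySem.List.pyGetD row (u + (k : Int)) 0 = _
    rw [show u + (k : Int) = ((u.toNat + k : Nat) : Int) by omega, PySem.List.pyGetD_natCast]
  rw [List.map_congr_left hc, sum_range_getD row (v - u).toNat u.toNat (by omega),
      show u.toNat + (v - u).toNat = v.toNat by omega]

theorem goodBox_children (w : List (List Int)) (a b u v : Int) (h : GoodBox w a b u v) :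
    GoodBox w a (PySem.Int.floordiv (a + b) 2) u (PySem.Int.floordiv (u + v) 2) ∧
    GoodBox w (PySem.Int.floordiv (a + b) 2) b u (PySem.Int.floordiv (u + v) 2) ∧
    GoodBox w a (PySem.Int.floordiv (a + b) 2) (PySem.Int.floordiv (u + v) 2) v ∧
    GoodBox w (PySem.Int.floordiv (a + b) 2) b (PySem.Int.floordiv (u + v) 2) v := by
  rw [PySem.Int.floordiv_eq_ediv_of_pos (by norm_num), PySem.Int.floordiv_eq_ediv_of_pos (by norm_num)]
  unfold GoodBox at h ⊢
  rcases h with ⟨h1, h2, h3, h4, h5, h6, h7⟩ | hba | hvu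
  · have hmid : ∀ row ∈ w, (u + v) / 2 ≤ (row.length : Int) := by
      intro row hr; have := h7 row hr; omega
    refine ⟨Or.inl ⟨h1, h2, by omega, by omega, h5, by omega, ?_⟩,
            Or.inl ⟨by omega, by omega, h3, h4, h5, by omega, ?_⟩,
            Or.inl ⟨h1, h2, by omega, by omega, by omega, h6, ?_⟩,
            Or.inl ⟨by omega, by omega, h3, h4, by omega, h6, ?_⟩⟩ <;>
      intro row hr <;> exact ⟨by have := h7 row hr; have := hmid row hr; omega,
                              by have := h7 row hr; have := hmid row hr; omega⟩
  · exact ⟨Or.inr (Or.inl (by omega)), Or.inr (Or.inl (by omega)),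
           Or.inr (Or.inl (by omega)), Or.inr (Or.inl (by omega))⟩
  · exact ⟨Or.inr (Or.inr (by omega)), Or.inr (Or.inr (by omega)),
           Or.inr (Or.inr (by omega)), Or.inr (Or.inr (by omega))⟩

theorem leaf_eq (w : List (List Int)) (a b u v : Int) (h : GoodBox w a b u v) :
    sandiaBase w a b u v = leafSum (buildR w) a b u v := by
  unfold sandiaBase leafSum
  by_cases huv : u < v
  · rw [if_pos huv]
    rcases h with ⟨h1, h2, h3, h4, h5, h6, h7⟩ | hba | hvu
    · simp only [PySem.List.foldl_add, zero_add]
      congr 1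
      refine List.map_congr_left ?_
      intro i hi
      rw [PySem.List.mem_pyRange_one] at hi
      have hiw : i < (w.length : Int) := by omega
      have h0i : (0:Int) ≤ i := by omega
      rw [buildR_eq, PySem.List.pyGetD_eq_getElem _ [] h0i hiw,
          PySem.List.pyGetD_eq_getElem _ [] h0i (by simpa using hiw),
          List.getElem_map]
      have hmem : w[i.toNat] ∈ w := List.getElem_mem _
      obtain ⟨hu, hv⟩ := h7 _ hmem
      rw [prefRow_get _ _ h5 hu, prefRow_get _ _ (by omega) hv,
          rowSeg_sum _ u v h5 (by omega) hv]
    · rw [PySem.List.pyRange_one_eq_nil hba]; simp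
    · omega
  · rw [if_neg huv]
    rw [PySem.List.pyRange_one_eq_nil (by omega)]
    simp only [List.foldl_nil]
    exact PySem.List.foldl_ignore _ _

theorem go_eq (w : List (List Int)) (n : Nat) (a b u v : Int) (h : GoodBox w a b u v) :
    sandiaGo w n a b u v = goB (buildR w) n a b u v := by
  induction n generalizing a b u v with
  | zero => exact leaf_eq w a b u v h
  | succ k ih =>
    obtain ⟨h1, h2, h3, h4⟩ := goodBox_children w a b u v h
    simp only [sandiaGo, goB, ih _ _ _ _ h1, ih _ _ _ _ h2, ih _ _ _ _ h3, ih _ _ _ _ h4]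

-- ===== VERDICT (by name: the statement is the Claim_ definition above) =====
theorem sandia_spec : Claim_equal_sandia := by
  intro w c xs xe ys ye _hdom hpre
  unfold Spec_sandia sandia sandia_alt
  rw [altLoop_spec]
  simp only [List.foldl_cons, List.foldl_nil, pushMin]
  exact go_eq w c.toNat xs xe ys ye hpre.2
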